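-- pv_equiv track=rewrite | github.com/jimscarver/quantum-logical-framework | quantum_simulator.py | generate_candidate_histories
-- ===== SOURCE A (Python) =====
-- from itertools import product
-- from typing import Dict, Iterable, List, Sequence, Tuple
--
-- def generate_candidate_histories(
--     alphabet: Sequence[str],
--     max_length: int,
-- ) -> List[str]:
--     """Generate all histories up to max_length."""
--     out: List[str] = []
--     for length in range(1, max_length + 1):
--         out.extend("".join(chars) for chars in product(alphabet, repeat=length))
--     return out
-- ===== SOURCE B (Python) =====
-- def generate_candidate_histories(alphabet, max_length):
--     """Generate all histories up to max_length."""
--     out = []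
--     current = [""]
--     for _ in range(max_length):
--         current = [s + c for s in current for c in alphabet]
--         out.extend(current)
--     return out
-- ===== Notes on version B (the rewrite author's own statement) =====
-- stated objective: alternative
-- what changed: Replaces the per-length itertools.product re-enumeration with an incremental level-by-level construction that extends the previous level's strings by one alphabet symbol.
import Mathlib
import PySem

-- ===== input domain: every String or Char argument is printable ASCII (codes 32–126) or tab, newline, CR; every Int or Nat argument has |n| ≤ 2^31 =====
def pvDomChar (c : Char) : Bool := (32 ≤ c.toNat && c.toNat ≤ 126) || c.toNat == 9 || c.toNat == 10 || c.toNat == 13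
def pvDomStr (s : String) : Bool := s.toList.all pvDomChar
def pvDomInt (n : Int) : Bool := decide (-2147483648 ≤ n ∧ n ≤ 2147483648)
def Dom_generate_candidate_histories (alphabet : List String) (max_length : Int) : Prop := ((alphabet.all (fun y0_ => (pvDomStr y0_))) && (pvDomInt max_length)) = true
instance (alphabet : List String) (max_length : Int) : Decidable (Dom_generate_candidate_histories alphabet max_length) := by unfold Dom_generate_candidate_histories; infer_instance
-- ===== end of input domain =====

-- B replaces the per-length itertools.product re-enumeration by an incremental
-- level-by-level construction: each level extends the previous level's strings
-- by one alphabet symbol (a genuinely different traversal, same overall cost).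

-- ===== PORT A =====
-- itertools.product(alphabet, repeat=n) joined: first factor varies slowest
def pvProduct (alphabet : List String) : Nat → List String
  | 0 => [""]
  | n + 1 => alphabet.flatMap (fun c => (pvProduct alphabet n).map (fun s => c ++ s))

def generate_candidate_histories (alphabet : List String) (max_length : Int) : List String :=
  (PySem.List.pyRange 1 (max_length + 1) 1).foldl
    (fun out len => out ++ pvProduct alphabet len.toNat) []

-- ===== PORT B =====
def pvStep (alphabet : List String) (cur : List String) : List String :=
  cur.flatMap (fun s => alphabet.map (fun c => s ++ c))

def generate_candidate_histories_alt (alphabet : List String) (max_length : Int) : List String :=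
  ((PySem.List.pyRange 0 max_length 1).foldl
    (fun (p : List String × List String) _ =>
      let cur := pvStep alphabet p.2
      (p.1 ++ cur, cur))
    ([], [""])).1

-- ===== PRECONDITION & SPEC =====
def Spec_generate_candidate_histories (alphabet : List String) (max_length : Int) (out : List String) : Prop := out = generate_candidate_histories_alt alphabet max_length
instance (alphabet : List String) (max_length : Int) (out : List String) : Decidable (Spec_generate_candidate_histories alphabet max_length out) := by unfold Spec_generate_candidate_histories; infer_instance

-- ===== CLAIM (what is proved, stated in full; the proofs are below) =====
def Claim_equal_generate_candidate_histories : Prop := ∀ (alphabet : List String) (max_length : Int), Dom_generate_candidate_histories alphabet max_length → Spec_generate_candidate_histories alphabet max_length (generate_candidate_histories alphabet max_length)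

-- ===== LEMMAS AND PROOFS =====

theorem pvStep_flatMap (ab xs : List String) :
    pvStep ab (ab.flatMap (fun c => xs.map (fun s => c ++ s)))
      = ab.flatMap (fun c => (pvStep ab xs).map (fun s => c ++ s)) := by
  simp only [pvStep, List.flatMap_assoc, List.map_flatMap, List.flatMap_map, List.map_map]
  congr 1; funext c; congr 1; funext s
  simp [Function.comp_def, String.append_assoc]

-- the prepend recursion of pvProduct also satisfies the append (pvStep) recursion
theorem pvProduct_succ_step (ab : List String) (n : Nat) :
    pvProduct ab (n + 1) = pvStep ab (pvProduct ab n) := by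
  induction n with
  | zero => simp [pvProduct, pvStep]
  | succ n ih =>
    show ab.flatMap (fun c => (pvProduct ab (n+1)).map (fun s => c ++ s)) = _
    rw [ih, ← pvStep_flatMap, ← ih]
    rfl

def pvLevels (ab : List String) (k : Nat) : Nat → List String
  | 0 => []
  | n + 1 => pvProduct ab (k + 1) ++ pvLevels ab (k + 1) n

theorem pvLevels_snoc (ab : List String) (k n : Nat) :
    pvLevels ab k (n + 1) = pvLevels ab k n ++ pvProduct ab (k + n + 1) := by
  induction n generalizing k with
  | zero => simp [pvLevels]
  | succ n ih =>
    show pvProduct ab (k+1) ++ pvLevels ab (k+1) (n+1) = _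
    rw [ih]
    have h : k + 1 + n + 1 = k + (n + 1) + 1 := by omega
    rw [h]
    simp [pvLevels, List.append_assoc]

-- B's fold ignores the list elements; only the length matters
theorem pvB_fold (ab : List String) (l : List Int) (acc : List String) (k : Nat) :
    (l.foldl
      (fun (p : List String × List String) _ =>
        let cur := pvStep ab p.2
        (p.1 ++ cur, cur))
      (acc, pvProduct ab k)) = (acc ++ pvLevels ab k l.length, pvProduct ab (k + l.length)) := by
  induction l generalizing acc k with
  | nil => simp [pvLevels]
  | cons x xs ih =>
    simp only [List.foldl_cons, ← pvProduct_succ_step]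
    rw [ih]
    have h : k + (x :: xs).length = (k + 1) + xs.length := by simp; omega
    rw [h]
    simp [pvLevels, List.append_assoc]

-- A's fold over range(1, max_length+1)
theorem pvA_fold (ab : List String) (n : Nat) (acc : List String) :
    (((List.range n).map (fun (k : Nat) => (1 : Int) + (k : Int))).foldl
      (fun out len => out ++ pvProduct ab len.toNat) acc)
      = acc ++ pvLevels ab 0 n := by
  induction n generalizing acc with
  | zero => simp [pvLevels]
  | succ n ih =>
    rw [List.range_succ, List.map_append, List.foldl_append, ih]
    have h1 : ((1 + (n : Int)).toNat) = n + 1 := by omega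
    have h2 : pvLevels ab 0 (n + 1) = pvLevels ab 0 n ++ pvProduct ab (n + 1) := by
      have := pvLevels_snoc ab 0 n; simpa using this
    simp [h1, h2]

-- ===== VERDICT (by name: the statement is the Claim_ definition above) =====
theorem generate_candidate_histories_spec : Claim_equal_generate_candidate_histories := by
  intro ab ml _
  show generate_candidate_histories ab ml = generate_candidate_histories_alt ab ml
  unfold generate_candidate_histories generate_candidate_histories_alt
  by_cases h : ml ≤ 0
  · rw [PySem.List.pyRange_one_eq_nil (by omega), PySem.List.pyRange_one_eq_nil h]
    simp
  · rw [PySem.List.pyRange_one, PySem.List.pyRange_one]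
    have hlen1 : ((ml + 1 : Int) - 1).toNat = ml.toNat := by omega
    have hlen0 : ((ml : Int) - 0).toNat = ml.toNat := by omega
    rw [hlen1, hlen0]
    rw [pvA_fold ab ml.toNat []]
    have hb := pvB_fold ab ((List.range ml.toNat).map (fun (k : Nat) => (0 : Int) + (k : Int))) [] 0
    simp only [pvProduct] at hb
    rw [hb]
    simp
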